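-- pv_equiv track=rewrite | github.com/MrBrantCode/unitest_baseline | mut_generate/mist_train_cf/cf_100621/solution.py | sentence_type
-- ===== SOURCE A (Python) =====
-- def sentence_type(sentence):
--     vowels = "aeiou"
--     consonants = "bcdfghjklmnpqrstvwxyz"
--     sentence = sentence.lower()
--     num_vowels = sum(sentence.count(v) for v in vowels)
--     num_consonants = sum(sentence.count(c) for c in consonants)
--     if num_vowels > num_consonants:
--         return "affirmative"
--     elif num_vowels < num_consonants:
--         return "negative"
--     else:
--         return "neutral"
-- ===== SOURCE B (Python) =====
-- def sentence_type(sentence):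
--     vowels = set("aeiou")
--     consonants = set("bcdfghjklmnpqrstvwxyz")
--     num_vowels = 0
--     num_consonants = 0
--     for ch in sentence.lower():
--         if ch in vowels:
--             num_vowels += 1
--         elif ch in consonants:
--             num_consonants += 1
--     if num_vowels > num_consonants:
--         return "affirmative"
--     elif num_vowels < num_consonants:
--         return "negative"
--     else:
--         return "neutral"
-- ===== Notes on version B (the rewrite author's own statement) =====
-- stated objective: idiomatic
-- what changed: Replaces 26 repeated .count scans of the sentence (one per alphabet letter) with a single pass over the lowered sentence incrementing vowel/consonant counters by set membership.
import Mathlib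
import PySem

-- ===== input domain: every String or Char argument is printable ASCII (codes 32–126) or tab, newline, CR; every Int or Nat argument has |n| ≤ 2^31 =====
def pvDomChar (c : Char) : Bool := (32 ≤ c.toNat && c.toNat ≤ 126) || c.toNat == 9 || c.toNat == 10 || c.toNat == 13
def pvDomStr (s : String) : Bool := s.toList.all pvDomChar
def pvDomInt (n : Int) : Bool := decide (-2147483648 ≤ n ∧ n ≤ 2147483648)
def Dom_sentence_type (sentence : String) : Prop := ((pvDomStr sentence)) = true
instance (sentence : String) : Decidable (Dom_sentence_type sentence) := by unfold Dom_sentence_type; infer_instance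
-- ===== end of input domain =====

-- B replaces A's 26 per-letter .count scans of the sentence by one single pass with two set-membership counters (objective: idiomatic).

-- ===== PORT A =====
def sentence_type (sentence : String) : String :=
  let vowels : List Char := "aeiou".toList
  let consonants : List Char := "bcdfghjklmnpqrstvwxyz".toList
  let s := PySem.Chars.lower sentence.toList
  let num_vowels := (vowels.map (fun v => PySem.Chars.count s [v])).sum
  let num_consonants := (consonants.map (fun c => PySem.Chars.count s [c])).sum
  if num_vowels > num_consonants then "affirmative"
  else if num_vowels < num_consonants then "negative"
  else "neutral"

-- ===== PORT B =====
def pvVowelSet : PySem.Set Char := PySem.Set.ofList "aeiou".toList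
def pvConsonantSet : PySem.Set Char := PySem.Set.ofList "bcdfghjklmnpqrstvwxyz".toList
def pvStep (acc : Nat × Nat) (ch : Char) : Nat × Nat :=
  if pvVowelSet.contains ch then (acc.1 + 1, acc.2)
  else if pvConsonantSet.contains ch then (acc.1, acc.2 + 1)
  else acc

def sentence_type_alt (sentence : String) : String :=
  let p := (PySem.Chars.lower sentence.toList).foldl pvStep (0, 0)
  if p.1 > p.2 then "affirmative"
  else if p.1 < p.2 then "negative"
  else "neutral"

-- ===== PRECONDITION & SPEC =====
def Spec_sentence_type (sentence : String) (out : String) : Prop := out = sentence_type_alt sentence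
instance (sentence : String) (out : String) : Decidable (Spec_sentence_type sentence out) := by unfold Spec_sentence_type; infer_instance

-- ===== CLAIM (what is proved, stated in full; the proofs are below) =====
def Claim_equal_sentence_type : Prop := ∀ (sentence : String), Dom_sentence_type sentence → Spec_sentence_type sentence (sentence_type sentence)

-- ===== LEMMAS AND PROOFS =====

-- Python str.count for a single-character needle is List.count
lemma count_go_singleton (c : Char) (l : List Char) : ∀ (fuel acc : Nat), l.length ≤ fuel →
    PySem.Chars.count.go [c] fuel l acc = acc + l.count c := by
  induction l with
  | nil => intro fuel acc _; cases fuel <;> simp [PySem.Chars.count.go]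
  | cons h t ih =>
      intro fuel acc hf
      cases fuel with
      | zero => simp at hf
      | succ f =>
          have ht : t.length ≤ f := by simpa using hf
          by_cases hc : c = h
          · subst hc
            simp [PySem.Chars.count.go, List.isPrefixOf, ih f (acc + 1) ht]
            omega
          · have hpre : ([c].isPrefixOf (h :: t)) = false := by
              simp [List.isPrefixOf, hc]
            simp [PySem.Chars.count.go, hpre, ih f acc ht, List.count_cons]
            simp [Ne.symm hc]

lemma count_singleton (L : List Char) (c : Char) :
    PySem.Chars.count L [c] = L.count c := by
  have := count_go_singleton c L L.length 0 le_rfl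
  simpa [PySem.Chars.count] using this

-- indicator sum over a duplicate-free list
lemma sum_indicator (c : Char) (vs : List Char) (hv : vs.Nodup) :
    (vs.map (fun v => if c == v then 1 else 0)).sum = (if c ∈ vs then 1 else 0 : Nat) := by
  induction vs with
  | nil => simp
  | cons v vs' ih =>
      rcases List.nodup_cons.mp hv with ⟨hnv, hv'⟩
      by_cases hc : c = v
      · subst hc
        rw [List.map_cons, List.sum_cons, ih hv']
        simp [hnv]
      · rw [List.map_cons, List.sum_cons, ih hv']
        simp [hc]

-- A's per-letter count sum equals a single countP over the string
lemma sum_counts (vs : List Char) (hv : vs.Nodup) (L : List Char) :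
    (vs.map (fun v => L.count v)).sum = L.countP (fun ch => decide (ch ∈ vs)) := by
  induction L with
  | nil => simp
  | cons c L ihL =>
      simp only [List.count_cons, List.countP_cons]
      have hsplit : (vs.map (fun v => L.count v + if c == v then 1 else 0)).sum
          = (vs.map (fun v => L.count v)).sum + (vs.map (fun v => if c == v then 1 else 0)).sum := by
        induction vs with
        | nil => simp
        | cons w ws ihw => simp at *; omega
      rw [hsplit, ihL, sum_indicator c vs hv]
      split <;> simp_all

-- the single pass accumulates exactly the two countP values
lemma foldl_pvStep (L : List Char) : ∀ (nv nc : Nat),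
    L.foldl pvStep (nv, nc)
      = (nv + L.countP (fun ch => decide (ch ∈ pvVowelSet)),
         nc + L.countP (fun ch => decide (ch ∉ pvVowelSet ∧ ch ∈ pvConsonantSet))) := by
  induction L with
  | nil => intro nv nc; simp
  | cons c L ih =>
      intro nv nc
      by_cases hV : c ∈ pvVowelSet
      · simp [pvStep, hV, ih]
        omega
      · by_cases hC : c ∈ pvConsonantSet
        · simp [pvStep, hV, hC, ih]
          omega
        · simp [pvStep, hV, hC, ih]

-- vowels and consonants are disjoint, so the elif-test reduces to consonant membership
lemma consonant_not_vowel (ch : Char) (h : ch ∈ pvConsonantSet) : ch ∉ pvVowelSet := by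
  have hset : pvConsonantSet = ['b','c','d','f','g','h','j','k','l','m','n','p','q','r','s','t','v','w','x','y','z'] := by decide
  rw [hset] at h
  simp only [List.mem_cons, List.not_mem_nil, or_false] at h
  rcases h with rfl | rfl | rfl | rfl | rfl | rfl | rfl | rfl | rfl | rfl | rfl | rfl | rfl | rfl | rfl | rfl | rfl | rfl | rfl | rfl | rfl <;> decide

lemma countP_consonant (L : List Char) :
    L.countP (fun ch => decide (ch ∉ pvVowelSet ∧ ch ∈ pvConsonantSet))
      = L.countP (fun ch => decide (ch ∈ pvConsonantSet)) := by
  apply List.countP_congr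
  intro ch _
  by_cases hC : ch ∈ pvConsonantSet
  · simp [hC, consonant_not_vowel ch hC]
  · simp [hC]

lemma vowel_list_eq : ("aeiou".toList : List Char) = pvVowelSet := by decide

lemma consonant_list_eq : ("bcdfghjklmnpqrstvwxyz".toList : List Char) = pvConsonantSet := by decide

-- ===== VERDICT (by name: the statement is the Claim_ definition above) =====
theorem sentence_type_spec : Claim_equal_sentence_type := by
  intro sentence _
  unfold Spec_sentence_type sentence_type sentence_type_alt
  rw [foldl_pvStep]
  simp only [count_singleton]
  rw [sum_counts _ (by decide), sum_counts _ (by decide), countP_consonant,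
      vowel_list_eq, consonant_list_eq]
  simp
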